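-- pv_equiv track=rewrite | github.com/levelgigio/gambler | simulator.py | find_max_fall
-- ===== SOURCE A (Python) =====
-- def find_max_fall(numbers):
--     extrema = []
--     n = len(numbers)
--
--     # Include the first number in the list as a local extremum
--     extrema.append(numbers[0])
--
--     # Iterate over the numbers, excluding the first and last ones
--     for i in range(1, n - 1):
--         # Check if the current number is a local extremum
--         if (numbers[i] >= numbers[i-1] and numbers[i] >= numbers[i+1]) or \
--            (numbers[i] <= numbers[i-1] and numbers[i] <= numbers[i+1]):
--             if extrema[-1] != numbers[i]:
--                 extrema.append(numbers[i])
--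
--     # Include the last number in the list as a local extremum
--
--     extrema.append(numbers[-1])
--
--     max_fall = 0
--     if extrema[0] > extrema[1]:
--         i = 0
--         while i < len(extrema)-1:
--             fall = extrema[i] - extrema[i+1]
--             if fall > max_fall:
--                 max_fall = fall
--             i = i + 2
--     else:
--         i = 1
--         while i < len(extrema)-1:
--             fall = extrema[i] - extrema[i+1]
--             if fall > max_fall:
--                 max_fall = fall
--             i = i + 2
--
--     return max_fall
-- ===== SOURCE B (Python) =====
-- def _emit(state, v):
--     # fold one more extremum value into the running state
--     last, odd, second, max_even, max_odd = state
--     fall = last - v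
--     if odd:
--         max_even = max(max_even, fall)
--     else:
--         max_odd = max(max_odd, fall)
--     if second is None:
--         second = v
--     return (v, not odd, second, max_even, max_odd)
--
-- def find_max_fall(numbers):
--     # single pass, O(1) extra space: state = (last extremum, odd count?, second extremum,
--     # best fall over pairs starting at odd-count positions, over even-count positions)
--     state = (numbers[0], True, None, 0, 0)
--     for i in range(1, len(numbers) - 1):
--         x = numbers[i]
--         if ((x >= numbers[i - 1] and x >= numbers[i + 1]) or
--                 (x <= numbers[i - 1] and x <= numbers[i + 1])) and state[0] != x:
--             state = _emit(state, x)
--     _, _, second, max_even, max_odd = _emit(state, numbers[-1])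
--     return max_even if numbers[0] > second else max_odd
-- ===== Notes on version B (the rewrite author's own statement) =====
-- stated objective: alternative
-- what changed: B replaces A's intermediate extrema list plus the two parity-stepping while-loops with a single fused accumulator pass that keeps only (last extremum, count parity, second extremum, and two running maxima) in O(1) extra space.
import Mathlib
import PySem

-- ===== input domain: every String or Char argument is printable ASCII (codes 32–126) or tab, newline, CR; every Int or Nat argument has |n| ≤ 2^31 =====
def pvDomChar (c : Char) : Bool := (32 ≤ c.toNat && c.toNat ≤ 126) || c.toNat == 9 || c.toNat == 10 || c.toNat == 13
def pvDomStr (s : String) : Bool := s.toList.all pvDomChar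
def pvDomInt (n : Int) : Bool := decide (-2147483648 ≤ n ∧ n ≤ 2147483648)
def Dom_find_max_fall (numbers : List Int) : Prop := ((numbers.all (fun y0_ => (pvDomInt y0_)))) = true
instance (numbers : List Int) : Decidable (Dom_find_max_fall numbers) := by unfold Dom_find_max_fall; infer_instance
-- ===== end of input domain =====

-- B fuses A's extrema-list construction and the two parity-stepping while-loops into one
-- accumulator pass keeping only (last extremum, count parity, second extremum, two running maxima);
-- equal return value on every nonempty list (objective: alternative decomposition).

-- ===== PORT A =====
-- A's local-extremum test (written verbatim in Source A)
def pvIsExtA (numbers : List Int) (i : Int) : Bool :=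
  let x := (PySem.List.pyGet? numbers i).getD 0
  let xm := (PySem.List.pyGet? numbers (i - 1)).getD 0
  let xp := (PySem.List.pyGet? numbers (i + 1)).getD 0
  decide ((x ≥ xm ∧ x ≥ xp) ∨ (x ≤ xm ∧ x ≤ xp))

-- literal port of A's stepping 'while i < len(extrema)-1: … i = i + 2' loop
def pvWhile (ext : List Int) (i maxFall : Int) : Int :=
  if h : i < (ext.length : Int) - 1 then
    let fall := (PySem.List.pyGet? ext i).getD 0 - (PySem.List.pyGet? ext (i + 1)).getD 0
    pvWhile ext (i + 2) (if fall > maxFall then fall else maxFall)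
  else maxFall
termination_by ((ext.length : Int) - 1 - i).toNat
decreasing_by omega

def find_max_fall (numbers : List Int) : Int :=
  let extrema : List Int := [] ++ [(PySem.List.pyGet? numbers 0).getD 0]
  let extrema := (PySem.List.pyRange 1 ((numbers.length : Int) - 1) 1).foldl
    (fun ext i =>
      if pvIsExtA numbers i then
        if (PySem.List.pyGet? ext (-1)).getD 0 ≠ (PySem.List.pyGet? numbers i).getD 0 then
          ext ++ [(PySem.List.pyGet? numbers i).getD 0]
        else ext
      else ext) extrema
  let extrema := extrema ++ [(PySem.List.pyGet? numbers (-1)).getD 0]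
  if (PySem.List.pyGet? extrema 0).getD 0 > (PySem.List.pyGet? extrema 1).getD 0 then
    pvWhile extrema 0 0
  else
    pvWhile extrema 1 0

-- ===== PORT B =====
-- B's local-extremum test (written verbatim in Source B)
def pvIsExtB (numbers : List Int) (i : Int) : Bool :=
  let x := (PySem.List.pyGet? numbers i).getD 0
  let xm := (PySem.List.pyGet? numbers (i - 1)).getD 0
  let xp := (PySem.List.pyGet? numbers (i + 1)).getD 0
  decide ((x ≥ xm ∧ x ≥ xp) ∨ (x ≤ xm ∧ x ≤ xp))

-- port of Source B's _emit: state = (last, odd, second, max_even, max_odd)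
def pvEmit (st : Int × Bool × Option Int × Int × Int) (v : Int) : Int × Bool × Option Int × Int × Int :=
  match st with
  | (last, odd, second, me, mo) =>
    (v, !odd,
     (match second with | none => some v | some s => some s),
     if odd then max me (last - v) else me,
     if odd then mo else max mo (last - v))

def find_max_fall_alt (numbers : List Int) : Int :=
  let st : Int × Bool × Option Int × Int × Int :=
    ((PySem.List.pyGet? numbers 0).getD 0, true, none, 0, 0)
  let st := (PySem.List.pyRange 1 ((numbers.length : Int) - 1) 1).foldl
    (fun st i =>
      if pvIsExtB numbers i ∧ st.1 ≠ (PySem.List.pyGet? numbers i).getD 0 then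
        pvEmit st ((PySem.List.pyGet? numbers i).getD 0)
      else st) st
  match pvEmit st ((PySem.List.pyGet? numbers (-1)).getD 0) with
  | (_, _, second, me, mo) =>
    if (PySem.List.pyGet? numbers 0).getD 0 > second.getD 0 then me else mo

-- ===== PRECONDITION & SPEC =====
-- Pre_ excludes only the empty list, on which A raises IndexError (numbers[0]).
def Pre_find_max_fall (numbers : List Int) : Prop := numbers ≠ []
instance (numbers : List Int) : Decidable (Pre_find_max_fall numbers) := by
  unfold Pre_find_max_fall; infer_instance

def pvWitness_find_max_fall : List Int := [1, 5, 2]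

def Spec_find_max_fall (numbers : List Int) (out : Int) : Prop := out = find_max_fall_alt numbers
instance (numbers : List Int) (out : Int) : Decidable (Spec_find_max_fall numbers out) := by unfold Spec_find_max_fall; infer_instance

-- ===== CLAIM (what is proved, stated in full; the proofs are below) =====
def Claim_equal_find_max_fall : Prop := ∀ (numbers : List Int), Dom_find_max_fall numbers → Pre_find_max_fall numbers → Spec_find_max_fall numbers (find_max_fall numbers)

-- ===== LEMMAS AND PROOFS =====

-- max fall over pairs starting at even positions / odd positions, floored at 0
def pairMax : List Int → Int × Int
  | [] => (0, 0)
  | [_] => (0, 0)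
  | x :: y :: t => (max (pairMax (y :: t)).2 (x - y), (pairMax (y :: t)).1)

lemma pairMax_nonneg (E : List Int) : 0 ≤ (pairMax E).1 ∧ 0 ≤ (pairMax E).2 := by
  induction E with
  | nil => simp [pairMax]
  | cons x t ih =>
    cases t with
    | nil => simp [pairMax]
    | cons y t' =>
      simp only [pairMax]
      exact ⟨le_trans ih.2 (le_max_left _ _), ih.1⟩

lemma pairMax_snd (x : Int) (t : List Int) : (pairMax (x :: t)).2 = (pairMax t).1 := by
  cases t with
  | nil => simp [pairMax]
  | cons y t' => simp [pairMax]

lemma pairMax_cons_cons (x y : Int) (t : List Int) :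
    (pairMax (x :: y :: t)).1 = max (pairMax t).1 (x - y) := by
  simp [pairMax, pairMax_snd]

lemma pvWhile_eq (ext : List Int) (i m : Int) (hi : 0 ≤ i) (hm : 0 ≤ m) :
    pvWhile ext i m = max m (pairMax (ext.drop i.toNat)).1 := by
  rw [pvWhile]
  split
  · next h =>
    have h2 : i.toNat + 1 < ext.length := by omega
    have hd : ext.drop i.toNat = ext[i.toNat] :: ext[i.toNat + 1] :: ext.drop (i.toNat + 1 + 1) := by
      rw [List.getElem_cons_drop, List.getElem_cons_drop]
    have hti : (i + 1).toNat = i.toNat + 1 := by omega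
    have hg1 : (PySem.List.pyGet? ext i).getD 0 = ext[i.toNat] := by
      rw [PySem.List.pyGet?_of_nonneg _ hi, List.getElem?_eq_getElem (by omega)]; rfl
    have hg2 : (PySem.List.pyGet? ext (i + 1)).getD 0 = ext[i.toNat + 1] := by
      rw [PySem.List.pyGet?_of_nonneg _ (by omega), hti, List.getElem?_eq_getElem (by omega)]; rfl
    have ih := pvWhile_eq ext (i + 2)
      (if ext[i.toNat] - ext[i.toNat + 1] > m then ext[i.toNat] - ext[i.toNat + 1] else m)
      (by omega) (by split <;> omega)
    simp only [hg1, hg2]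
    rw [ih, hd, pairMax_cons_cons]
    have h22 : (i + 2).toNat = i.toNat + 1 + 1 := by omega
    rw [h22]
    simp only [max_def]
    split_ifs <;> omega
  · next h =>
    have hlen : (ext.drop i.toNat).length ≤ 1 := by
      simp only [List.length_drop]; omega
    have hz : (pairMax (ext.drop i.toNat)).1 = 0 := by
      cases hD : ext.drop i.toNat with
      | nil => simp [pairMax]
      | cons a t =>
        cases t with
        | nil => simp [pairMax]
        | cons b t' => rw [hD] at hlen; simp at hlen
    rw [hz]
    exact (max_eq_left hm).symm
termination_by ((ext.length : Int) - 1 - i).toNat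
decreasing_by omega

-- components of the pvEmit fold
lemma emit_fold_fst (t : List Int) : ∀ (l : Int) (b : Bool) (sec : Option Int) (me mo : Int),
    (List.foldl pvEmit (l, b, sec, me, mo) t).1 = t.getLastD l := by
  induction t with
  | nil => intro l b sec me mo; simp
  | cons v t' ih =>
    intro l b sec me mo
    simp only [List.foldl_cons, pvEmit, List.getLastD_cons]
    exact ih v (!b) _ _ _

lemma emit_fold_sec (t : List Int) : ∀ (l : Int) (b : Bool) (s : Int) (me mo : Int),
    (List.foldl pvEmit (l, b, some s, me, mo) t).2.2.1 = some s := by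
  induction t with
  | nil => intro l b s me mo; simp
  | cons v t' ih =>
    intro l b s me mo
    simp only [List.foldl_cons, pvEmit]
    exact ih v (!b) s _ _

lemma emit_fold_sec_none (t : List Int) (l : Int) (b : Bool) (me mo : Int) :
    (List.foldl pvEmit (l, b, none, me, mo) t).2.2.1 = t.head? := by
  cases t with
  | nil => simp
  | cons v t' =>
    simp only [List.foldl_cons, pvEmit]
    rw [emit_fold_sec]
    simp

lemma emit_fold_max (t : List Int) : ∀ (l : Int) (b : Bool) (sec : Option Int) (me mo : Int),
    0 ≤ me → 0 ≤ mo →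
    (List.foldl pvEmit (l, b, sec, me, mo) t).2.2.2.1
      = (if b then max me (pairMax (l :: t)).1 else max me (pairMax (l :: t)).2) ∧
    (List.foldl pvEmit (l, b, sec, me, mo) t).2.2.2.2
      = (if b then max mo (pairMax (l :: t)).2 else max mo (pairMax (l :: t)).1) := by
  induction t with
  | nil =>
    intro l b sec me mo hme hmo
    simp only [List.foldl_nil, pairMax]
    constructor <;> cases b <;> simp <;> omega
  | cons v t' ih =>
    intro l b sec me mo hme hmo
    cases b with
    | true =>
      simp only [List.foldl_cons, pvEmit, Bool.not_true, if_true]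
      have H := ih v false (match sec with | none => some v | some s => some s)
        (max me (l - v)) mo (le_trans hme (le_max_left _ _)) hmo
      simp only [Bool.false_eq_true, if_false] at H
      refine ⟨?_, ?_⟩
      · rw [H.1, pairMax_snd, pairMax_cons_cons, max_assoc, max_comm (l - v)]
      · rw [H.2, pairMax_snd]
    | false =>
      simp only [List.foldl_cons, pvEmit, Bool.not_false, Bool.false_eq_true, if_false]
      have H := ih v true (match sec with | none => some v | some s => some s)
        me (max mo (l - v)) hme (le_trans hmo (le_max_left _ _))
      simp only [if_true] at H
      refine ⟨?_, ?_⟩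
      · rw [H.1, pairMax_snd]
      · rw [H.2, pairMax_snd, pairMax_cons_cons, max_assoc, max_comm (l - v)]

-- the in-loop invariant: B's fold state is the pvEmit-fold over the tail of A's extrema list
lemma range_fold_inv (numbers : List Int) (e0 : Int) (R : List Int) : ∀ (t : List Int),
    R.foldl (fun st i =>
      if pvIsExtB numbers i ∧ st.1 ≠ (PySem.List.pyGet? numbers i).getD 0 then
        pvEmit st ((PySem.List.pyGet? numbers i).getD 0)
      else st) (List.foldl pvEmit (e0, true, none, 0, 0) t)
    = List.foldl pvEmit (e0, true, none, 0, 0)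
        ((R.foldl (fun ext i =>
          if pvIsExtA numbers i then
            if (PySem.List.pyGet? ext (-1)).getD 0 ≠ (PySem.List.pyGet? numbers i).getD 0 then
              ext ++ [(PySem.List.pyGet? numbers i).getD 0]
            else ext
          else ext) (e0 :: t)).tail) := by
  induction R with
  | nil => intro t; simp
  | cons i R' ih =>
    intro t
    simp only [List.foldl_cons]
    have hlast : (List.foldl pvEmit (e0, true, none, 0, 0) t).1 = (e0 :: t).getLastD 0 := by
      rw [emit_fold_fst, List.getLastD_cons]
    have hneg : (PySem.List.pyGet? (e0 :: t) (-1)).getD 0 = (e0 :: t).getLastD 0 := by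
      rw [PySem.List.pyGet?_neg_one]
      cases hlt : (e0 :: t).getLast? with
      | none => simp at hlt
      | some z => simp [List.getLastD_eq_getLast?, hlt]
    by_cases hc : pvIsExtA numbers i
    · by_cases hd : (PySem.List.pyGet? (e0 :: t) (-1)).getD 0 ≠ (PySem.List.pyGet? numbers i).getD 0
      · have hd' : (List.foldl pvEmit (e0, true, none, 0, 0) t).1
            ≠ (PySem.List.pyGet? numbers i).getD 0 := by rw [hlast, ← hneg]; exact hd
        rw [if_pos ⟨hc, hd'⟩, if_pos hc, if_pos hd]
        have : pvEmit (List.foldl pvEmit (e0, true, none, 0, 0) t) ((PySem.List.pyGet? numbers i).getD 0)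
            = List.foldl pvEmit (e0, true, none, 0, 0) (t ++ [(PySem.List.pyGet? numbers i).getD 0]) := by
          rw [List.foldl_append]; rfl
        rw [this]
        have hre : (e0 :: t) ++ [(PySem.List.pyGet? numbers i).getD 0]
            = e0 :: (t ++ [(PySem.List.pyGet? numbers i).getD 0]) := by simp
        rw [hre]
        exact ih (t ++ [(PySem.List.pyGet? numbers i).getD 0])
      · have hd' : ¬ (List.foldl pvEmit (e0, true, none, 0, 0) t).1
            ≠ (PySem.List.pyGet? numbers i).getD 0 := by rw [hlast, ← hneg]; exact hd
        rw [if_neg (by tauto), if_pos hc, if_neg hd]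
        exact ih t
    · rw [if_neg (by tauto), if_neg hc]
      exact ih t

-- A's extrema fold keeps the head
lemma ext_fold_cons (numbers : List Int) (e0 : Int) (R : List Int) : ∀ (t : List Int),
    ∃ t', (R.foldl (fun ext i =>
          if pvIsExtA numbers i then
            if (PySem.List.pyGet? ext (-1)).getD 0 ≠ (PySem.List.pyGet? numbers i).getD 0 then
              ext ++ [(PySem.List.pyGet? numbers i).getD 0]
            else ext
          else ext) (e0 :: t)) = e0 :: t' := by
  induction R with
  | nil => intro t; exact ⟨t, rfl⟩
  | cons i R' ih =>
    intro t
    simp only [List.foldl_cons]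
    by_cases hc : pvIsExtA numbers i
    · by_cases hd : (PySem.List.pyGet? (e0 :: t) (-1)).getD 0 ≠ (PySem.List.pyGet? numbers i).getD 0
      · rw [if_pos hc, if_pos hd, List.cons_append]
        exact ih _
      · rw [if_pos hc, if_neg hd]; exact ih t
    · rw [if_neg hc]; exact ih t

-- ===== VERDICT (by name: the statement is the Claim_ definition above) =====
theorem find_max_fall_spec : Claim_equal_find_max_fall := by
  intro numbers _ hpre
  unfold Spec_find_max_fall find_max_fall find_max_fall_alt
  simp only []
  set e0 := (PySem.List.pyGet? numbers 0).getD 0 with he0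
  set xl := (PySem.List.pyGet? numbers (-1)).getD 0 with hxl
  set R := PySem.List.pyRange 1 ((numbers.length : Int) - 1) 1 with hR
  obtain ⟨tF, htF⟩ := ext_fold_cons numbers e0 R []
  have hinv := range_fold_inv numbers e0 R []
  simp only [List.foldl_nil] at hinv
  rw [htF] at hinv
  simp only [List.tail_cons] at hinv
  rw [List.nil_append, htF, hinv]
  -- B's final emit = fold over T := tF ++ [xl]
  have hBfin : pvEmit (List.foldl pvEmit (e0, true, none, 0, 0) tF) xl
      = List.foldl pvEmit (e0, true, none, 0, 0) (tF ++ [xl]) := by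
    rw [List.foldl_append]; rfl
  set T := tF ++ [xl] with hT
  have hTne : T ≠ [] := by simp [hT]
  -- the full extrema list
  have hE : (e0 :: tF) ++ [xl] = e0 :: T := by simp [hT]
  rw [hBfin, hE]
  -- components of B's final state
  have hsec : (List.foldl pvEmit (e0, true, none, 0, 0) T).2.2.1 = T.head? := emit_fold_sec_none T e0 true 0 0
  have hmax := emit_fold_max T e0 true none 0 0 le_rfl le_rfl
  simp only [if_true] at hmax
  have hpm := pairMax_nonneg (e0 :: T)
  -- A's comparisons
  have hg0 : (PySem.List.pyGet? (e0 :: T) 0).getD 0 = e0 := by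
    rw [PySem.List.pyGet?_zero_cons]; rfl
  obtain ⟨h1, Ttl, hh1⟩ := List.exists_cons_of_ne_nil hTne
  have hg1 : (PySem.List.pyGet? (e0 :: T) 1).getD 0 = h1 := by
    have : (1 : Int) = ((0 : Nat) : Int) + 1 := by norm_num
    rw [this, PySem.List.pyGet?_cons_succ, hh1]
    simp
  have hsec' : (List.foldl pvEmit (e0, true, none, 0, 0) T).2.2.1.getD 0 = h1 := by
    rw [hsec, hh1]; rfl
  -- now case on the destructuring match on B's side
  rcases hst : List.foldl pvEmit (e0, true, none, 0, 0) T with ⟨la, ob, sec, me, mo⟩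
  have hme : me = max 0 (pairMax (e0 :: T)).1 := by
    have := hmax.1; rw [hst] at this; exact this
  have hmo : mo = max 0 (pairMax (e0 :: T)).2 := by
    have := hmax.2; rw [hst] at this; exact this
  have hsecv : sec.getD 0 = h1 := by
    have := hsec'; rw [hst] at this; exact this
  simp only [hg0, hg1, hsecv]
  -- both sides branch on e0 > h1
  by_cases hcmp : e0 > h1
  · rw [if_pos hcmp, if_pos hcmp]
    rw [pvWhile_eq (e0 :: T) 0 0 le_rfl le_rfl]
    simp only [Int.toNat_zero, List.drop_zero]
    rw [hme]
  · rw [if_neg hcmp, if_neg hcmp]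
    rw [pvWhile_eq (e0 :: T) 1 0 (by norm_num) le_rfl]
    have : (1 : Int).toNat = 1 := rfl
    rw [this]
    simp only [List.drop_one, List.tail_cons]
    rw [hmo, pairMax_snd]
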